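-- pv_equiv track=rewrite | github.com/GlazkoAE/transmitter-demo | source/processing.py | parce_real_imag
-- ===== SOURCE A (Python) =====
-- def parse_bytes(sample, bytes_num):
--     res = 0
--     for index in range(bytes_num):
--         coeff = 2 ** (8 * index)
--         res += sample[index] * coeff
--     return res
--
-- def parse_samples(signal, bytes_num):
--     sample = []
--     res = []
--     for byte in signal:
--         sample.append(byte)
--         if len(sample) == bytes_num:
--             res.append(parse_bytes(sample, bytes_num))
--             sample = []
--     return res
--
-- def parce_real_imag(data: list[int], bytes_per_sample=1):
--     i_samples = []
--     q_samples = []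
--     for sample_start_index in range(0, len(data), 2 * bytes_per_sample):
--         i_last = sample_start_index + bytes_per_sample
--         q_last = sample_start_index + bytes_per_sample * 2
--         i_sig = data[sample_start_index:i_last]
--         q_sig = data[i_last:q_last]
--         i_samples += parse_samples(i_sig, bytes_per_sample)
--         q_samples += parse_samples(q_sig, bytes_per_sample)
--     return i_samples, q_samples
-- ===== SOURCE B (Python) =====
-- def parce_real_imag(data: list[int], bytes_per_sample=1):
--     samples = [
--         sum(data[start + i] * 256 ** i for i in range(bytes_per_sample))
--         for start in range(0, len(data) - bytes_per_sample + 1, bytes_per_sample)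
--     ]
--     return samples[0::2], samples[1::2]
-- ===== Notes on version B (the rewrite author's own statement) =====
-- stated objective: simpler
-- what changed: A walks the stream in 2*bytes_per_sample blocks and re-runs an accumulator-based sub-parser on each I and Q slice; B parses the whole stream once as consecutive bytes_per_sample chunks with a direct weighted sum per chunk and then deinterleaves the flat sample list with the two step-2 slices samples[0::2] / samples[1::2].
import Mathlib
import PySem

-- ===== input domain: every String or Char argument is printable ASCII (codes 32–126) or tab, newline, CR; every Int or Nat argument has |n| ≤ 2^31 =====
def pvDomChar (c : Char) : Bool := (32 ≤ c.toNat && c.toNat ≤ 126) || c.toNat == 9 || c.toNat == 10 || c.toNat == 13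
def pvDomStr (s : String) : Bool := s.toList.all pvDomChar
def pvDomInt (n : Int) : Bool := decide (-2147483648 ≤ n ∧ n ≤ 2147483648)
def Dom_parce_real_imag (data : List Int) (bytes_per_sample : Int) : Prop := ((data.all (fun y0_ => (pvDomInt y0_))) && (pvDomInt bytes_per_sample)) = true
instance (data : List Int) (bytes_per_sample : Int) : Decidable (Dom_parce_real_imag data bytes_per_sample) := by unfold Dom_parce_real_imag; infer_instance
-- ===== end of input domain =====

-- B replaces A's block-of-2b walk with two relaunched sub-parsers by a single flat
-- chunk parse followed by step-2 slice deinterleaving (objective: simpler).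

-- ===== PORT A =====
-- parse_bytes: sample[index] is always in range at A's call sites (sample has length bytes_num),
-- so the pyGetD default 0 is unreachable.
def pvParseBytes (sample : List Int) (bytes_num : Int) : Int :=
  (PySem.List.pyRange 0 bytes_num 1).foldl
    (fun res index => res + PySem.List.pyGetD sample index 0 * 2 ^ ((8 * index).toNat)) 0

def pvParseSamples (signal : List Int) (bytes_num : Int) : List Int :=
  (signal.foldl
    (fun (st : List Int × List Int) byte =>
      let sample := st.1 ++ [byte]
      if (sample.length : Int) = bytes_num then (([] : List Int), st.2 ++ [pvParseBytes sample bytes_num])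
      else (sample, st.2))
    (([] : List Int), ([] : List Int))).2

def parce_real_imag (data : List Int) (bytes_per_sample : Int) : List Int × List Int :=
  (PySem.List.pyRange 0 (data.length : Int) (2 * bytes_per_sample)).foldl
    (fun (st : List Int × List Int) sample_start_index =>
      let i_last := sample_start_index + bytes_per_sample
      let q_last := sample_start_index + bytes_per_sample * 2
      let i_sig := PySem.List.slice data (some sample_start_index) (some i_last)
      let q_sig := PySem.List.slice data (some i_last) (some q_last)
      (st.1 ++ pvParseSamples i_sig bytes_per_sample, st.2 ++ pvParseSamples q_sig bytes_per_sample))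
    (([] : List Int), ([] : List Int))

-- ===== PORT B =====
-- data[start + i] is always in range (start ranges over full chunks only); step-2 slices:
-- slice? never returns none since the step 2 ≠ 0.
def parce_real_imag_alt (data : List Int) (bytes_per_sample : Int) : List Int × List Int :=
  let samples :=
    (PySem.List.pyRange 0 ((data.length : Int) - bytes_per_sample + 1) bytes_per_sample).map
      (fun start =>
        ((PySem.List.pyRange 0 bytes_per_sample 1).map
          (fun i => PySem.List.pyGetD data (start + i) 0 * 256 ^ i.toNat)).sum)
  ((PySem.List.slice? samples (some 0) none 2).getD [],
   (PySem.List.slice? samples (some 1) none 2).getD [])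

-- ===== PRECONDITION & SPEC =====
-- Pre_ excludes exactly bytes_per_sample = 0, where Python's range(..., 0) raises ValueError in A
-- (and in B alike).
def Pre_parce_real_imag (data : List Int) (bytes_per_sample : Int) : Prop := bytes_per_sample ≠ 0
instance (data : List Int) (bytes_per_sample : Int) : Decidable (Pre_parce_real_imag data bytes_per_sample) := by unfold Pre_parce_real_imag; infer_instance

def pvWitness_parce_real_imag : List Int × Int := ([1, 2, 3, 4], 1)

def Spec_parce_real_imag (data : List Int) (bytes_per_sample : Int) (out : List Int × List Int) : Prop := out = parce_real_imag_alt data bytes_per_sample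
instance (data : List Int) (bytes_per_sample : Int) (out : List Int × List Int) : Decidable (Spec_parce_real_imag data bytes_per_sample out) := by unfold Spec_parce_real_imag; infer_instance

-- ===== CLAIM (what is proved, stated in full; the proofs are below) =====
def Claim_equal_parce_real_imag : Prop := ∀ (data : List Int) (bytes_per_sample : Int), Dom_parce_real_imag data bytes_per_sample → Pre_parce_real_imag data bytes_per_sample → Spec_parce_real_imag data bytes_per_sample (parce_real_imag data bytes_per_sample)

-- ===== LEMMAS AND PROOFS =====

-- the value of one full chunk, as both programs compute it
def pvVal (c : List Int) (b : Int) : Int :=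
  ((PySem.List.pyRange 0 b 1).map
    (fun index => PySem.List.pyGetD c index 0 * 2 ^ ((8 * index).toNat))).sum

-- the flat list of full-chunk sample values
def pvChunks (b' : Nat) (l : List Int) : List Int :=
  if _h : 0 < b' ∧ b' ≤ l.length then
    pvVal (l.take b') (b' : Int) :: pvChunks b' (l.drop b')
  else []
termination_by l.length
decreasing_by simp only [List.length_drop]; omega

def pvEvens : List Int → List Int
  | [] => []
  | a :: l => a :: pvEvens l.tail
termination_by l => l.length
decreasing_by simp [List.length_tail]

def pvOdds (l : List Int) : List Int := pvEvens l.tail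

-- range lemmas for a general step
theorem pvRange_pos_nil {a b s : Int} (hs : 0 < s) (h : b ≤ a) :
    PySem.List.pyRange a b s = [] := by
  rw [PySem.List.pyRange_of_pos a b hs, if_neg (by omega)]
  simp

theorem pvRange_pos_cons {a b s : Int} (hs : 0 < s) (h : a < b) :
    PySem.List.pyRange a b s = a :: PySem.List.pyRange (a + s) b s := by
  rw [PySem.List.pyRange_of_pos a b hs, PySem.List.pyRange_of_pos (a+s) b hs, if_pos h]
  have key : ((b - a + s - 1) / s).toNat
      = (if a + s < b then ((b - (a + s) + s - 1) / s).toNat else 0) + 1 := by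
    have h1 : b - a + s - 1 = (b - a - 1) + 1 * s := by ring
    have h2 : (b - a + s - 1) / s = (b - a - 1) / s + 1 := by
      rw [h1, Int.add_mul_ediv_right _ _ (by omega)]
    by_cases hc : a + s < b
    · rw [if_pos hc, h2]
      have : b - (a + s) + s - 1 = b - a - 1 := by ring
      rw [this]
      have : 0 ≤ (b - a - 1) / s := Int.ediv_nonneg (by omega) (by omega)
      omega
    · rw [if_neg hc, h2, Int.ediv_eq_zero_of_lt (by omega) (by omega)]; omega
  rw [key, List.range_succ_eq_map, List.map_cons]
  simp only [Nat.cast_zero, mul_zero, add_zero, List.map_map]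
  congr 1
  apply List.map_congr_left
  intro k _
  simp [Nat.succ_eq_add_one]
  ring

theorem pvRange_neg_nil {a b s : Int} (hs : s < 0) (h : a ≤ b) :
    PySem.List.pyRange a b s = [] := by
  unfold PySem.List.pyRange
  rw [if_neg (by omega)]
  simp only [if_neg (by omega : ¬ 0 < s), if_neg (by omega : ¬ b < a)]
  simp

-- parse_samples characterisation
theorem pvParseBytes_eq (c : List Int) (b : Int) : pvParseBytes c b = pvVal c b := by
  unfold pvParseBytes pvVal
  rw [PySem.List.foldl_add]
  simp

theorem pvPS_short (b : Int) : ∀ (sig acc res : List Int),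
    ((acc.length + sig.length : Int) < b) →
    (sig.foldl
      (fun (st : List Int × List Int) byte =>
        let sample := st.1 ++ [byte]
        if (sample.length : Int) = b then (([] : List Int), st.2 ++ [pvParseBytes sample b])
        else (sample, st.2)) (acc, res)) = (acc ++ sig, res) := by
  intro sig
  induction sig with
  | nil => intro acc res h; simp
  | cons x rest ih =>
    intro acc res h
    simp only [List.foldl_cons]
    rw [if_neg (by simp at h ⊢; omega)]
    rw [ih (acc ++ [x]) res (by simp at h ⊢; omega)]
    simp

theorem pvPS_full (b : Int) : ∀ (sig acc res : List Int), sig ≠ [] →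
    ((acc.length + sig.length : Int) = b) →
    (sig.foldl
      (fun (st : List Int × List Int) byte =>
        let sample := st.1 ++ [byte]
        if (sample.length : Int) = b then (([] : List Int), st.2 ++ [pvParseBytes sample b])
        else (sample, st.2)) (acc, res)) = ([], res ++ [pvParseBytes (acc ++ sig) b]) := by
  intro sig
  induction sig with
  | nil => intro acc res h; exact absurd rfl h
  | cons x rest ih =>
    intro acc res _ h
    simp only [List.foldl_cons]
    by_cases hr : rest = []
    · subst hr
      rw [if_pos (by simp at h ⊢; omega)]
      simp
    · rw [if_neg (by
        rcases rest with _ | ⟨y, t⟩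
        · exact absurd rfl hr
        · simp at h ⊢; omega)]
      rw [ih (acc ++ [x]) res hr (by simp at h ⊢; omega)]
      simp

theorem pvParseSamples_lt {sig : List Int} {b : Int} (h : (sig.length : Int) < b) :
    pvParseSamples sig b = [] := by
  unfold pvParseSamples
  rw [pvPS_short b sig [] [] (by simpa using h)]

theorem pvParseSamples_eq {sig : List Int} {b : Int} (hb : 0 < b) (h : (sig.length : Int) = b) :
    pvParseSamples sig b = [pvVal sig b] := by
  unfold pvParseSamples
  rw [pvPS_full b sig [] [] (by rintro rfl; simp at h; omega) (by simpa using h)]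
  simp [pvParseBytes_eq]

-- A's loop produces the even/odd split of the flat chunk list
theorem pvA_flat (data : List Int) (b : Int) (hb : 0 < b) (m : Nat) : ∀ (s : Nat),
    data.length - s = m →
    ((PySem.List.pyRange (s : Int) (data.length : Int) (2 * b)).flatMap
        (fun t => pvParseSamples (PySem.List.slice data (some t) (some (t + b))) b)
      = pvEvens (pvChunks b.toNat (data.drop s)))
    ∧ ((PySem.List.pyRange (s : Int) (data.length : Int) (2 * b)).flatMap
        (fun t => pvParseSamples (PySem.List.slice data (some (t + b)) (some (t + b * 2))) b)
      = pvOdds (pvChunks b.toNat (data.drop s))) := by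
  induction m using Nat.strong_induction_on with
  | _ m ih =>
    intro s hm
    by_cases hend : (s : Int) < (data.length : Int)
    · -- at least one more byte: peel one block of the range
      rw [pvRange_pos_cons (by omega) hend, List.flatMap_cons, List.flatMap_cons]
      -- the two slices of this block
      have h2 : ((s : Int)).toNat = s := by omega
      have h1 : ((s : Int) + b).toNat - ((s : Int)).toNat = b.toNat := by omega
      have h1' : ((s : Int) + b * 2).toNat - ((s : Int) + b).toNat = b.toNat := by omega
      have h2' : ((s : Int) + b).toNat = s + b.toNat := by omega
      have hi : PySem.List.slice data (some (s : Int)) (some ((s : Int) + b))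
          = (data.drop s).take b.toNat := by
        rw [PySem.List.slice_toNat data (by omega) (by omega), h1, h2]
      have hq : PySem.List.slice data (some ((s : Int) + b)) (some ((s : Int) + b * 2))
          = (data.drop (s + b.toNat)).take b.toNat := by
        rw [PySem.List.slice_toNat data (by omega) (by omega), h1', h2']
      rw [hi, hq]
      have hbb : ((b.toNat : Nat) : Int) = b := by omega
      by_cases hfull1 : s + b.toNat ≤ data.length
      · -- the I chunk is full
        have hleni : (((data.drop s).take b.toNat).length : Int) = b := by
          simp [List.length_take, List.length_drop]; omega
        rw [pvParseSamples_eq hb hleni]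
        by_cases hfull2 : s + 2 * b.toNat ≤ data.length
        · -- the Q chunk is full as well: two chunks peeled, recurse
          have hlenq : (((data.drop (s + b.toNat)).take b.toNat).length : Int) = b := by
            simp [List.length_take, List.length_drop]; omega
          rw [pvParseSamples_eq hb hlenq]
          have hcast : (s : Int) + 2 * b = ((s + 2 * b.toNat : Nat) : Int) := by omega
          have hrec := ih (data.length - (s + 2 * b.toNat)) (by omega) (s + 2 * b.toNat) rfl
          rw [hcast, hrec.1, hrec.2]
          have hacc : s + b.toNat + b.toNat = s + 2 * b.toNat := by omega
          have hch : pvChunks b.toNat (data.drop s)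
              = pvVal ((data.drop s).take b.toNat) b
                :: pvVal ((data.drop (s + b.toNat)).take b.toNat) b
                :: pvChunks b.toNat (data.drop (s + 2 * b.toNat)) := by
            rw [pvChunks, dif_pos ⟨by omega, by simp [List.length_drop]; omega⟩, List.drop_drop,
                pvChunks, dif_pos ⟨by omega, by simp [List.length_drop]; omega⟩, List.drop_drop,
                hacc, hbb]
          rw [hch]
          constructor
          · rw [pvEvens, List.tail_cons]
            simp
          · conv_rhs => rw [pvOdds, List.tail_cons, pvEvens]
            simp [pvOdds]
        · -- the Q chunk is partial: it is dropped and the loop ends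
          have hlenq : (((data.drop (s + b.toNat)).take b.toNat).length : Int) < b := by
            simp [List.length_take, List.length_drop]; omega
          rw [pvParseSamples_lt hlenq,
              pvRange_pos_nil (by omega) (by omega : (data.length : Int) ≤ (s : Int) + 2 * b)]
          have hch2 : pvChunks b.toNat (data.drop (s + b.toNat)) = [] := by
            rw [pvChunks, dif_neg (by simp [List.length_drop]; omega)]
          have hch : pvChunks b.toNat (data.drop s)
              = [pvVal ((data.drop s).take b.toNat) b] := by
            rw [pvChunks, dif_pos ⟨by omega, by simp [List.length_drop]; omega⟩, List.drop_drop,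
                hch2, hbb]
          rw [hch]
          constructor
          · rw [pvEvens]
            simp [pvEvens]
          · simp [pvOdds, pvEvens]
      · -- even the I chunk is partial: both are dropped and the loop ends
        have hleni : (((data.drop s).take b.toNat).length : Int) < b := by
          simp [List.length_take, List.length_drop]; omega
        have hlenq : (((data.drop (s + b.toNat)).take b.toNat).length : Int) < b := by
          simp [List.length_take, List.length_drop]; omega
        rw [pvParseSamples_lt hleni, pvParseSamples_lt hlenq,
            pvRange_pos_nil (by omega) (by omega : (data.length : Int) ≤ (s : Int) + 2 * b)]
        rw [pvChunks, dif_neg (by simp [List.length_drop]; omega)]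
        simp [pvEvens, pvOdds]
    · -- past the end: the range is empty and no chunk remains
      rw [pvRange_pos_nil (by omega) (by omega)]
      rw [pvChunks, dif_neg (by simp [List.length_drop]; omega)]
      simp [pvEvens, pvOdds]

-- one full chunk's value, as B computes it at absolute start s
theorem pvVal_head (data : List Int) (b : Int) (hb : 0 < b) (s : Nat)
    (h : s + b.toNat ≤ data.length) :
    ((PySem.List.pyRange 0 b 1).map
        (fun i => PySem.List.pyGetD data ((s : Int) + i) 0 * 256 ^ i.toNat)).sum
      = pvVal ((data.drop s).take b.toNat) b := by
  unfold pvVal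
  congr 1
  apply List.map_congr_left
  intro i hi
  rw [PySem.List.mem_pyRange_one] at hi
  have hlen : ((data.drop s).take b.toNat).length = b.toNat := by
    simp [List.length_take, List.length_drop]; omega
  rw [PySem.List.pyGetD_eq_getElem data 0 (by omega) (by omega),
      PySem.List.pyGetD_eq_getElem _ 0 (by omega) (by rw [hlen]; omega)]
  have hpow : (256 : Int) ^ i.toNat = 2 ^ ((8 * i).toNat) := by
    have h8 : (8 * i).toNat = 8 * i.toNat := by omega
    rw [h8, pow_mul]
    norm_num
  rw [hpow, List.getElem_take, List.getElem_drop]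
  congr 2
  omega

-- B's map produces the flat chunk list
theorem pvB_samples (data : List Int) (b : Int) (hb : 0 < b) (m : Nat) : ∀ (s : Nat),
    data.length - s = m →
    (PySem.List.pyRange (s : Int) ((data.length : Int) - b + 1) b).map
        (fun start =>
          ((PySem.List.pyRange 0 b 1).map
            (fun i => PySem.List.pyGetD data (start + i) 0 * 256 ^ i.toNat)).sum)
      = pvChunks b.toNat (data.drop s) := by
  induction m using Nat.strong_induction_on with
  | _ m ih =>
    intro s hm
    by_cases hlt : (s : Int) < (data.length : Int) - b + 1
    · have hsb : s + b.toNat ≤ data.length := by omega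
      have hlt' : data.length - (s + b.toNat) < m := by omega
      rw [pvRange_pos_cons hb hlt, List.map_cons, pvVal_head data b hb s hsb]
      have hcast : (s : Int) + b = ((s + b.toNat : Nat) : Int) := by omega
      rw [hcast, ih (data.length - (s + b.toNat)) hlt' (s + b.toNat) rfl]
      conv_rhs => rw [pvChunks]
      rw [dif_pos ⟨by omega, by simp [List.length_drop]; omega⟩]
      rw [List.drop_drop]
      have hbb : ((b.toNat : Nat) : Int) = b := by omega
      rw [hbb]
    · rw [pvRange_pos_nil hb (by omega), List.map_nil, pvChunks,
          dif_neg (by simp [List.length_drop]; omega)]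

-- step-2 slices are the even/odd split
theorem pv_fm_evens : ∀ (m : Nat) (xs : List Int), xs.length = m →
    List.filterMap (fun k : Nat => xs[(0 + 2*(k:Int)).toNat]?)
      (List.range (((xs.length:Int) + 1)/2).toNat) = pvEvens xs := by
  intro m
  induction m using Nat.strong_induction_on with
  | _ m ih =>
    intro xs hm
    match xs with
    | [] => simp [pvEvens]
    | [x] => simp [pvEvens]
    | x :: y :: u =>
      have hc : (((x :: y :: u).length : Int) + 1)/2 = ((u.length : Int) + 1)/2 + 1 := by
        simp; omega
      rw [hc]
      have hc2 : ((((u.length : Int) + 1)/2) + 1).toNat = (((u.length : Int) + 1)/2).toNat + 1 := by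
        omega
      rw [hc2, List.range_succ_eq_map, List.filterMap_cons, List.filterMap_map]
      norm_num
      rw [pvEvens, List.tail_cons]
      congr 1
      rw [List.filterMap_congr (g := fun k : Nat => u[(0 + 2*(k:Int)).toNat]?) ?_]
      · exact ih u.length (by subst hm; simp) u rfl
      · intro k _
        have h1 : (2*((k:Int)+1)).toNat = (0 + 2*(k:Int)).toNat + 2 := by omega
        rw [h1]
        simp

theorem pvSlice_evens (xs : List Int) :
    PySem.List.slice? xs (some 0) none 2 = some (pvEvens xs) := by
  rw [← pv_fm_evens xs.length xs rfl]
  unfold PySem.List.slice? PySem.List.sliceIndices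
  norm_num
  have hcount : (if 0 < xs.length then (((xs.length:Int) + 2 - 1) / 2).toNat else 0)
      = (((xs.length:Int) + 1) / 2).toNat := by split <;> omega
  rw [hcount]

theorem pvSlice_odds (xs : List Int) :
    PySem.List.slice? xs (some 1) none 2 = some (pvOdds xs) := by
  match xs with
  | [] =>
    rw [show pvOdds [] = [] from by simp [pvOdds, pvEvens]]
    rfl
  | x :: t =>
    rw [pvOdds, List.tail_cons, ← pv_fm_evens t.length t rfl]
    unfold PySem.List.slice? PySem.List.sliceIndices
    norm_num
    have hcount : (if 0 < t.length then (((t.length:Int) + 2 - 1) / 2).toNat else 0)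
        = (((t.length:Int) + 1) / 2).toNat := by split <;> omega
    rw [hcount]
    apply List.filterMap_congr
    intro k _
    have h1 : (1 + 2*(k:Int)).toNat = (2*(k:Int)).toNat + 1 := by omega
    rw [h1]
    simp

-- ===== VERDICT (by name: the statement is the Claim_ definition above) =====
theorem parce_real_imag_spec : Claim_equal_parce_real_imag := by
  intro data b _ hb
  unfold Spec_parce_real_imag parce_real_imag parce_real_imag_alt
  dsimp only
  rcases lt_or_gt_of_ne hb with hneg | hpos
  · rw [pvRange_neg_nil (by omega) (by positivity),
        pvRange_neg_nil hneg (by have := data.length; omega)]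
    simp [PySem.List.slice?]
  · rw [PySem.List.foldl_prod_mk
          (fun a t => a ++ pvParseSamples (PySem.List.slice data (some t) (some (t + b))) b)
          (fun a t => a ++ pvParseSamples (PySem.List.slice data (some (t + b)) (some (t + b * 2))) b),
        PySem.List.foldl_append_eq_flatMap, PySem.List.foldl_append_eq_flatMap]
    have hA := pvA_flat data b hpos data.length 0 (by omega)
    have hB := pvB_samples data b hpos data.length 0 (by omega)
    simp only [Nat.cast_zero, List.drop_zero] at hA hB
    rw [hA.1, hA.2, hB, pvSlice_evens, pvSlice_odds]
    simp
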